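-- pv_equiv track=rewrite | github.com/3BMLabs/building.py | sandbox/Example Projects/Unit System.py | ModulesUltimo
-- ===== SOURCE A (Python) =====
-- def ModulesUltimo(levels,numberofmodules):
--     Lst = []
--     level = 0
--     for i in range(levels):
--         x = 0
--         for i in range(numberofmodules):
--             Lst.append([level,x,0,0])
--             x = x +1
--         level = level + 1
--     return Lst
-- ===== SOURCE B (Python) =====
-- def ModulesUltimo(levels, numberofmodules):
--     rows = max(levels, 0)
--     cols = max(numberofmodules, 0)
--     return [[i // cols, i % cols, 0, 0] for i in range(rows * cols)]
-- ===== Notes on version B (the rewrite author's own statement) =====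
-- stated objective: alternative
-- what changed: Replaces the two nested loops and mutable level/x counters with a single comprehension over the flat index range rows*cols, recovering (level, x) by divmod; clamping to max(.,0) makes the count 0 exactly when either range is empty, so row order and empty cases match A exactly.
import Mathlib
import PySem

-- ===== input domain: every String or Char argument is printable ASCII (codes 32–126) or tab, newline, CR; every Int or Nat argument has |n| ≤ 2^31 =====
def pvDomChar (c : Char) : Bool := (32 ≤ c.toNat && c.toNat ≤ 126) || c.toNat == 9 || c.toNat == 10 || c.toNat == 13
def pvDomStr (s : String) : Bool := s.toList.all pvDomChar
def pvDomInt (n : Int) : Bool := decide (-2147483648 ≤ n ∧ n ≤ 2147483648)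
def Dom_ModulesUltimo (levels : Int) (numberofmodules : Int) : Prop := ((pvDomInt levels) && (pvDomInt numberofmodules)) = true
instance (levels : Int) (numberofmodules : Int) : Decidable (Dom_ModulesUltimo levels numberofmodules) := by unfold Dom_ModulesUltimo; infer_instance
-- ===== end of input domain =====

-- B replaces the two nested loops by one comprehension over the flat index range
-- rows*cols, recovering (level, x) by divmod (alternative decomposition, same cost).

-- ===== PORT A =====
def ModulesUltimo (levels : Int) (numberofmodules : Int) : List (List Int) :=
  let st := (PySem.List.pyRange 0 levels 1).foldl
    (fun (st : List (List Int) × Int) _ =>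
      let inner := (PySem.List.pyRange 0 numberofmodules 1).foldl
        (fun (st2 : List (List Int) × Int) _ => (st2.1 ++ [[st.2, st2.2, 0, 0]], st2.2 + 1))
        (st.1, 0)
      (inner.1, st.2 + 1))
    ([], 0)
  st.1

-- ===== PORT B =====
def ModulesUltimo_alt (levels : Int) (numberofmodules : Int) : List (List Int) :=
  let rows := max levels 0
  let cols := max numberofmodules 0
  (PySem.List.pyRange 0 (rows * cols) 1).map
    (fun i => [PySem.Int.floordiv i cols, PySem.Int.mod i cols, 0, 0])

-- ===== PRECONDITION & SPEC =====
def Spec_ModulesUltimo (levels : Int) (numberofmodules : Int) (out : List (List Int)) : Prop := out = ModulesUltimo_alt levels numberofmodules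
instance (levels : Int) (numberofmodules : Int) (out : List (List Int)) : Decidable (Spec_ModulesUltimo levels numberofmodules out) := by unfold Spec_ModulesUltimo; infer_instance

-- ===== CLAIM (what is proved, stated in full; the proofs are below) =====
def Claim_equal_ModulesUltimo : Prop := ∀ (levels : Int) (numberofmodules : Int), Dom_ModulesUltimo levels numberofmodules → Spec_ModulesUltimo levels numberofmodules (ModulesUltimo levels numberofmodules)

-- ===== LEMMAS AND PROOFS =====

-- closed form of one row of the grid (proof-only helper)
def pvG (m : Int) (lv : Int) : List (List Int) :=
  (List.range m.toNat).map (fun x : Nat => [lv, (x : Int), 0, 0])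

-- the inner append-and-count loop, in closed form
theorem pv_inner_foldl (lv : Int) (l : List Int) (acc : List (List Int)) (x0 : Int) :
    l.foldl (fun (st2 : List (List Int) × Int) _ => (st2.1 ++ [[lv, st2.2, 0, 0]], st2.2 + 1)) (acc, x0)
      = (acc ++ (List.range l.length).map (fun k : Nat => [lv, x0 + (k : Int), 0, 0]),
         x0 + (l.length : Int)) := by
  induction l generalizing acc x0 with
  | nil => simp
  | cons a t ih =>
    simp only [List.foldl_cons, ih, List.length_cons, List.range_succ_eq_map, List.map_cons,
      List.map_map, Prod.mk.injEq]
    constructor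
    · rw [List.append_assoc]
      congr 1
      simp only [List.singleton_append]
      congr 1
      · norm_num
      · congr 1
        funext k
        congr 2
        push_cast
        ring
    · push_cast; ring

-- the outer loop, in closed form, for a body appending g of the running counter
theorem pv_outer_foldl (g : Int → List (List Int)) (l : List Int)
    (acc : List (List Int)) (x0 : Int) :
    l.foldl (fun (st : List (List Int) × Int) _ => (st.1 ++ g st.2, st.2 + 1)) (acc, x0)
      = (acc ++ (List.range l.length).flatMap (fun k : Nat => g (x0 + (k : Int))),
         x0 + (l.length : Int)) := by
  induction l generalizing acc x0 with
  | nil => simp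
  | cons a t ih =>
    simp only [List.foldl_cons, ih, List.length_cons, List.range_succ_eq_map,
      List.flatMap_cons, List.flatMap_map, Prod.mk.injEq]
    constructor
    · rw [List.append_assoc]
      congr 1
      congr 1
      · norm_num
      · apply List.flatMap_congr
        intro x hx
        congr 1
        push_cast
        ring
    · push_cast; ring

theorem pv_A_char (levels numberofmodules : Int) :
    ModulesUltimo levels numberofmodules
      = (List.range levels.toNat).flatMap (fun lv : Nat => pvG numberofmodules (lv : Int)) := by
  unfold ModulesUltimo
  have hbody : (fun (st : List (List Int) × Int) (_ : Int) =>
      (((PySem.List.pyRange 0 numberofmodules 1).foldl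
        (fun (st2 : List (List Int) × Int) _ => (st2.1 ++ [[st.2, st2.2, 0, 0]], st2.2 + 1))
        (st.1, 0)).1, st.2 + 1))
      = (fun (st : List (List Int) × Int) (_ : Int) =>
          (st.1 ++ pvG numberofmodules st.2, st.2 + 1)) := by
    funext st i
    rw [pv_inner_foldl st.2]
    simp [pvG, PySem.List.length_pyRange_one]
  simp only [hbody]
  rw [pv_outer_foldl (pvG numberofmodules)]
  simp [PySem.List.length_pyRange_one]

theorem pv_B_char (levels numberofmodules : Int) :
    ModulesUltimo_alt levels numberofmodules
      = (List.range (levels.toNat * numberofmodules.toNat)).map (fun k : Nat =>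
          [((k / numberofmodules.toNat : Nat) : Int), ((k % numberofmodules.toNat : Nat) : Int), 0, 0]) := by
  have hr : max levels 0 = (levels.toNat : Int) := (Int.toNat_eq_max levels).symm
  have hc : max numberofmodules 0 = (numberofmodules.toNat : Int) := (Int.toNat_eq_max numberofmodules).symm
  simp only [ModulesUltimo_alt, hr, hc]
  rw [← Nat.cast_mul, PySem.List.pyRange_zero_natCast, List.map_map]
  apply List.map_congr_left
  intro a ha
  simp only [Function.comp_def, PySem.Int.floordiv_natCast, PySem.Int.mod_natCast]

-- divmod enumeration of the grid, by induction on the number of rows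
theorem pv_grid (L M : Nat) :
    (List.range (L * M)).map (fun k : Nat =>
        [((k / M : Nat) : Int), ((k % M : Nat) : Int), 0, 0])
      = (List.range L).flatMap (fun lv : Nat => pvG (M : Int) (lv : Int)) := by
  induction L with
  | zero => simp
  | succ L ih =>
    have h1 : (L + 1) * M = L * M + M := by ring
    rw [h1, List.range_add, List.map_append, ih, List.range_succ, List.flatMap_append]
    congr 1
    simp only [List.flatMap_cons, List.flatMap_nil, List.append_nil, List.map_map, pvG,
      Int.toNat_natCast]
    apply List.map_congr_left
    intro x hx
    have hxM : x < M := List.mem_range.mp hx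
    have hM : 0 < M := Nat.lt_of_le_of_lt (Nat.zero_le x) hxM
    have hdiv : (L * M + x) / M = L := by
      rw [Nat.add_comm, Nat.add_mul_div_right _ _ hM, Nat.div_eq_of_lt hxM]
      omega
    have hmod : (L * M + x) % M = x := by
      rw [Nat.add_comm, Nat.add_mul_mod_self_right, Nat.mod_eq_of_lt hxM]
    simp only [Function.comp_def, hdiv, hmod]

-- ===== VERDICT (by name: the statement is the Claim_ definition above) =====
theorem ModulesUltimo_spec : Claim_equal_ModulesUltimo := by
  intro levels numberofmodules _
  unfold Spec_ModulesUltimo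
  rw [pv_A_char, pv_B_char, pv_grid]
  have h : ((max numberofmodules 0).toNat : Nat) = numberofmodules.toNat := by omega
  simp [pvG, h]
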